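-- pv_equiv track=rewrite | github.com/uwcms/ZYNQ-IPMC-HW | TestBoard/ipmc_testsuite.py | gpio_range_for_direction
-- ===== SOURCE A (Python) =====
-- def gpio_range_for_direction(direction):
--     r = 0;
--     for i in range(0,32):
--         if direction & (1 << i):
--             r += 1
--         else:
--             break
--
--     return r
-- ===== SOURCE B (Python) =====
-- def gpio_range_for_direction(direction):
--     m = direction & 0xFFFFFFFF
--     if m == 0xFFFFFFFF:
--         return 32
--     return (m ^ (m + 1)).bit_length() - 1
-- ===== Notes on version B (the rewrite author's own statement) =====
-- stated objective: idiomatic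
-- what changed: Replaces A's fixed 32-iteration scan over individual bits with a single closed-form bit trick: mask to 32 bits, special-case all-ones as 32, else (m ^ (m+1)).bit_length() - 1 gives the trailing-ones count.
import Mathlib
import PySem

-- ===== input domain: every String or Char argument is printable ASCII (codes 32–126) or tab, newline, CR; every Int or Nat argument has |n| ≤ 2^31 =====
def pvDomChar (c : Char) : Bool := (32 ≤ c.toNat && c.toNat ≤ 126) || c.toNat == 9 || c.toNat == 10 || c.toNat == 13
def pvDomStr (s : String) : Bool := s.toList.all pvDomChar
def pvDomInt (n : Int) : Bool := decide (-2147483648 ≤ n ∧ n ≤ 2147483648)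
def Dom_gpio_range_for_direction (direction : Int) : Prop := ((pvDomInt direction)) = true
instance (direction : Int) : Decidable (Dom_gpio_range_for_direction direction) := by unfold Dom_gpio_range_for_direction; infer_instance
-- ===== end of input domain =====

-- B replaces A's 32-step scan for trailing set bits by a closed-form bit trick
-- (mask to 32 bits, then (m ^ (m+1)).bit_length() - 1, with the all-ones case giving 32).

-- ===== PORT A =====
-- 'for i in range(0,32): if direction & (1 << i): r += 1 else: break' becomes structural
-- recursion over the index list (break = stop recursing); '&' is PySem.Int.band (Python-exact
-- on negatives), '1 << i' is core '1 <<< i', truthiness of 'direction & (1 << i)' is '≠ 0'.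
def gpioRangeLoop (direction : Int) : List Nat → Int → Int
  | [], r => r
  | i :: rest, r =>
    if PySem.Int.band direction ((1 : Int) <<< i) ≠ 0 then gpioRangeLoop direction rest (r + 1)
    else r

def gpio_range_for_direction (direction : Int) : Int :=
  gpioRangeLoop direction (List.range 32) 0

-- ===== PORT B =====
-- Source B: m = direction & 0xFFFFFFFF; 32 if m == 0xFFFFFFFF else (m ^ (m + 1)).bit_length() - 1
def gpio_range_for_direction_alt (direction : Int) : Int :=
  let m := PySem.Int.band direction 4294967295
  if m = 4294967295 then 32
  else (PySem.Int.bitLength (PySem.Int.bxor m (m + 1)) : Int) - 1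

-- ===== PRECONDITION & SPEC =====
def Spec_gpio_range_for_direction (direction : Int) (out : Int) : Prop := out = gpio_range_for_direction_alt direction
instance (direction : Int) (out : Int) : Decidable (Spec_gpio_range_for_direction direction out) := by unfold Spec_gpio_range_for_direction; infer_instance

-- ===== CLAIM (what is proved, stated in full; the proofs are below) =====
def Claim_equal_gpio_range_for_direction : Prop := ∀ (direction : Int), Dom_gpio_range_for_direction direction → Spec_gpio_range_for_direction direction (gpio_range_for_direction direction)

-- ===== LEMMAS AND PROOFS =====

/-- The Boolean tested by A's loop at index `i`. -/
def pvTBit (d : Int) (i : Nat) : Bool := decide (PySem.Int.band d ((1 : Int) <<< i) ≠ 0)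

/-- Trailing-true count of `pvTBit d` starting at index `s`, capped at `c`. -/
def pvTCount (d : Int) : Nat → Nat → Nat
  | 0, _ => 0
  | c + 1, s => if pvTBit d s then pvTCount d c (s + 1) + 1 else 0

/-- The low 32 bits of `d`, as a natural number. -/
def pvNMask (d : Int) : Nat := (PySem.Int.band d 4294967295).toNat

lemma pvLoop_eq (d : Int) : ∀ (c s : Nat) (r : Int),
    gpioRangeLoop d (List.range' s c) r = r + (pvTCount d c s : Int) := by
  intro c
  induction c with
  | zero => intro s r; simp [gpioRangeLoop, pvTCount]
  | succ c ih =>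
    intro s r
    simp only [List.range'_succ, gpioRangeLoop, pvTCount]
    by_cases h : pvTBit d s
    · rw [if_pos h, if_pos (by simpa [pvTBit] using h), ih]
      push_cast; ring
    · rw [if_neg h, if_neg (by simpa [pvTBit] using h)]
      simp

lemma pvTCount_all (d : Int) : ∀ (c s : Nat),
    (∀ j, s ≤ j → j < s + c → pvTBit d j = true) → pvTCount d c s = c := by
  intro c
  induction c with
  | zero => intro s _; rfl
  | succ c ih =>
    intro s h
    have hs : pvTBit d s = true := h s le_rfl (by omega)
    simp only [pvTCount, hs, if_pos]
    rw [ih (s + 1) (fun j h1 h2 => h j (by omega) (by omega))]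

lemma pvTCount_upto (d : Int) : ∀ (c s k : Nat),
    (∀ j, s ≤ j → j < k → pvTBit d j = true) → s ≤ k → k < s + c → pvTBit d k = false →
    pvTCount d c s = k - s := by
  intro c
  induction c with
  | zero => intro s k _ h1 h2 _; omega
  | succ c ih =>
    intro s k hall hsk hk hfalse
    by_cases hs : s = k
    · subst hs
      simp [pvTCount, hfalse]
    · have hb : pvTBit d s = true := hall s le_rfl (by omega)
      simp only [pvTCount, hb, if_pos]
      rw [ih (s + 1) k (fun j h1 h2 => hall j (by omega) h2) (by omega) (by omega) hfalse]
      omega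

lemma pvShift_one (i : Nat) : (1 : Int) <<< i = ((2 ^ i : Nat) : Int) := by
  simp [Int.shiftLeft_eq]

-- For the low 32 bits: A's loop condition at bit `i` agrees with `(pvNMask d).testBit i`.
lemma pvTBit_eq (d : Int) (i : Nat) (hi : i < 32) : pvTBit d i = (pvNMask d).testBit i := by
  by_cases hd : 0 ≤ d
  · -- nonnegative `d`: both sides are bits of `d.toNat`
    have h1 : PySem.Int.band d ((1 : Int) <<< i) = ((d.toNat &&& 2 ^ i : Nat) : Int) := by
      rw [pvShift_one, PySem.Int.band_of_nonneg hd (by positivity), Int.toNat_natCast]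
    have h2 : PySem.Int.band d 4294967295 = ((d.toNat &&& 4294967295 : Nat) : Int) := by
      rw [(by norm_num : (4294967295 : Int) = ((4294967295 : Nat) : Int)),
        PySem.Int.band_of_nonneg hd (by positivity), Int.toNat_natCast]
    rw [pvTBit, pvNMask, h1, h2, Int.toNat_natCast, Nat.and_two_pow]
    have hmask : (4294967295 : Nat) = 2 ^ 32 - 1 := by norm_num
    rw [Nat.testBit_land, hmask, Nat.testBit_two_pow_sub_one]
    cases h : d.toNat.testBit i <;> simp [hi]
  · -- negative `d`: both sides are negations of bits of `(-d-1).toNat`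
    set u := (-d - 1).toNat with hu
    have hband : ∀ b : Int, 0 ≤ b →
        PySem.Int.band d b = ((b.toNat - (b.toNat &&& u) : Nat) : Int) := by
      intro b hb
      rw [PySem.Int.band]
      rw [if_neg hd, if_pos hb]
    have h1 : PySem.Int.band d ((1 : Int) <<< i) = ((2 ^ i - (2 ^ i &&& u) : Nat) : Int) := by
      rw [pvShift_one, hband _ (by positivity), Int.toNat_natCast]
    have h2 : PySem.Int.band d 4294967295 = ((4294967295 - (4294967295 &&& u) : Nat) : Int) := by
      rw [(by norm_num : (4294967295 : Int) = ((4294967295 : Nat) : Int)),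
        hband _ (by positivity), Int.toNat_natCast]
    have hvle : (4294967295 &&& u) ≤ 4294967295 := Nat.and_le_left
    have hmask : (4294967295 : Nat) = 2 ^ 32 - 1 := by norm_num
    have hsub : (4294967295 - (4294967295 &&& u) : Nat)
        = 2 ^ 32 - ((4294967295 &&& u) + 1) := by omega
    rw [pvTBit, pvNMask, h1, h2, Int.toNat_natCast, hsub,
      Nat.testBit_two_pow_sub_succ (by omega), Nat.testBit_land, hmask,
      Nat.testBit_two_pow_sub_one, Nat.two_pow_and]
    cases h : u.testBit i <;> simp [hi]

lemma pvNMask_lt (d : Int) : pvNMask d < 2 ^ 32 := by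
  by_cases hd : 0 ≤ d
  · rw [pvNMask, PySem.Int.band_of_nonneg hd (by norm_num), Int.toNat_natCast]
    have : d.toNat &&& (4294967295 : Int).toNat ≤ (4294967295 : Int).toNat := Nat.and_le_right
    norm_num at this ⊢
    omega
  · rw [pvNMask, PySem.Int.band]
    rw [if_neg hd, if_pos (by norm_num : (0 : Int) ≤ 4294967295), Int.toNat_natCast]
    norm_num
    omega

lemma pvBand_mask_eq (d : Int) : PySem.Int.band d 4294967295 = ((pvNMask d : Nat) : Int) := by
  have h : 0 ≤ PySem.Int.band d 4294967295 := by
    rw [PySem.Int.band_comm]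
    exact PySem.Int.band_nonneg_of_nonneg_left d (by norm_num)
  rw [pvNMask, Int.toNat_of_nonneg h]

lemma pvBitLength_two_pow_sub_one (e : Nat) (he : 0 < e) :
    PySem.Int.bitLength ((2 ^ e - 1 : Nat) : Int) = e := by
  have hpos : (0 : Nat) < 2 ^ e - 1 := by
    have : 2 ^ 1 ≤ 2 ^ e := Nat.pow_le_pow_right (by norm_num) he
    omega
  have hne : ((2 ^ e - 1 : Nat) : Int) ≠ 0 :=
    Nat.cast_ne_zero.mpr (by omega)
  set bl := PySem.Int.bitLength ((2 ^ e - 1 : Nat) : Int) with hbl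
  have habs : ((2 ^ e - 1 : Nat) : Int).natAbs = 2 ^ e - 1 := Int.natAbs_natCast _
  have hub : 2 ^ e - 1 < 2 ^ bl := by
    have := PySem.Int.lt_two_pow_bitLength ((2 ^ e - 1 : Nat) : Int)
    rwa [habs] at this
  have hlb : 2 ^ (bl - 1) ≤ 2 ^ e - 1 := by
    have := PySem.Int.two_pow_bitLength_le ((2 ^ e - 1 : Nat) : Int) hne
    rwa [habs] at this
  have h1 : e ≤ bl := by
    by_contra hcon
    have : 2 ^ bl ≤ 2 ^ (e - 1) := Nat.pow_le_pow_right (by norm_num) (by omega)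
    have h2 : 2 ^ (e - 1) < 2 ^ e := Nat.pow_lt_pow_right (by norm_num) (by omega)
    omega
  have h2 : bl ≤ e := by
    by_contra hcon
    have hle : 2 ^ e ≤ 2 ^ (bl - 1) := Nat.pow_le_pow_right (by norm_num) (by omega)
    omega
  omega

-- the xor bit-trick: if bits 0..k-1 of n are set and bit k is not, then n ^^^ (n+1) = 2^(k+1)-1
lemma pvXor_succ (n k : Nat) (hlow : ∀ j, j < k → n.testBit j = true)
    (hk : n.testBit k = false) : n ^^^ (n + 1) = 2 ^ (k + 1) - 1 := by
  have hv : n % 2 ^ (k + 1) = 2 ^ k - 1 := by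
    apply Nat.eq_of_testBit_eq
    intro i
    rw [Nat.testBit_mod_two_pow, Nat.testBit_two_pow_sub_one]
    rcases lt_trichotomy i k with h | h | h
    · simp [hlow i h, h, (show i < k + 1 by omega)]
    · subst h; simp [hk]
    · simp [(show ¬ i < k + 1 by omega), (show ¬ i < k by omega)]
  have hdecomp : n = 2 ^ (k + 1) * (n / 2 ^ (k + 1)) + (2 ^ k - 1) := by
    conv_lhs => rw [← Nat.div_add_mod n (2 ^ (k + 1))]
    omega
  have hpk : (0 : Nat) < 2 ^ k := Nat.two_pow_pos k
  have hsucc : n + 1 = 2 ^ (k + 1) * (n / 2 ^ (k + 1)) + 2 ^ k := by omega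
  apply Nat.eq_of_testBit_eq
  intro j
  have hx : n.testBit j
      = if j < k + 1 then (2 ^ k - 1).testBit j else (n / 2 ^ (k + 1)).testBit (j - (k + 1)) := by
    conv_lhs => rw [hdecomp]
    exact Nat.testBit_two_pow_mul_add _ (by omega) j
  have hy : (n + 1).testBit j
      = if j < k + 1 then (2 ^ k).testBit j else (n / 2 ^ (k + 1)).testBit (j - (k + 1)) := by
    rw [hsucc]
    exact Nat.testBit_two_pow_mul_add _
      (Nat.pow_lt_pow_right (by norm_num) (by omega)) j
  rw [Nat.testBit_xor, Nat.testBit_two_pow_sub_one, hx, hy]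
  rcases lt_trichotomy j k with h | h | h
  · simp [h, (show j < k + 1 by omega), Nat.testBit_two_pow_sub_one,
      (show k ≠ j by omega)]
  · subst h
    simp [Nat.testBit_two_pow_sub_one]
  · simp [(show ¬ j < k + 1 by omega)]

-- ===== VERDICT (by name: the statement is the Claim_ definition above) =====
theorem gpio_range_for_direction_spec : Claim_equal_gpio_range_for_direction := by
  unfold Claim_equal_gpio_range_for_direction
  intro d _
  unfold Spec_gpio_range_for_direction
  set n := pvNMask d with hn
  have hA : gpio_range_for_direction d = (pvTCount d 32 0 : Int) := by
    rw [gpio_range_for_direction, List.range_eq_range', pvLoop_eq]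
    simp
  have hnlt : n < 2 ^ 32 := pvNMask_lt d
  by_cases hfull : n = 2 ^ 32 - 1
  · -- all 32 low bits set: A counts 32, B takes the m == 0xFFFFFFFF branch
    have hB : gpio_range_for_direction_alt d = 32 := by
      rw [gpio_range_for_direction_alt]
      simp only [pvBand_mask_eq d, ← hn, hfull]
      norm_num
    have hbits : ∀ j, 0 ≤ j → j < 0 + 32 → pvTBit d j = true := by
      intro j _ hj
      rw [pvTBit_eq d j (by omega), ← hn, hfull, Nat.testBit_two_pow_sub_one]
      simpa using (show j < 32 by omega)
    rw [hA, hB, pvTCount_all d 32 0 hbits]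
    norm_num
  · -- some low bit clear: both sides equal the least clear bit k
    have hw : ∃ i, i < 32 ∧ n.testBit i = false := by
      by_contra hcon
      push Not at hcon
      apply hfull
      apply Nat.eq_of_testBit_eq
      intro i
      rw [Nat.testBit_two_pow_sub_one]
      by_cases hi : i < 32
      · have h1 := hcon i hi
        simp only [hi, decide_true]
        simpa using h1
      · have h1 : n.testBit i = false :=
          Nat.testBit_eq_false_of_lt (lt_of_lt_of_le hnlt
            (Nat.pow_le_pow_right (by norm_num) (by omega)))
        simp [hi, h1]
    obtain ⟨i0, hi0, hib0⟩ := hw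
    have hex : ∃ i, n.testBit i = false := ⟨i0, hib0⟩
    set k := Nat.find hex with hk
    have hkfalse : n.testBit k = false := Nat.find_spec hex
    have hkmin : ∀ j, j < k → n.testBit j = true := by
      intro j hj
      have := Nat.find_min hex hj
      simpa using this
    have hk32 : k < 32 := lt_of_le_of_lt (Nat.find_min' hex hib0) hi0
    have hAk : gpio_range_for_direction d = (k : Int) := by
      rw [hA, pvTCount_upto d 32 0 k
        (fun j _ hj => by rw [pvTBit_eq d j (by omega), ← hn]; exact hkmin j hj)
        (by omega) (by omega)
        (by rw [pvTBit_eq d k (by omega), ← hn]; exact hkfalse)]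
      simp
    have hBk : gpio_range_for_direction_alt d = (k : Int) := by
      rw [gpio_range_for_direction_alt]
      simp only [pvBand_mask_eq d, ← hn]
      have hne : ((n : Nat) : Int) ≠ 4294967295 := by
        intro hcon
        apply hfull
        have : (n : Int) = ((2 ^ 32 - 1 : Nat) : Int) := by push_cast; omega
        exact_mod_cast this
      rw [if_neg hne]
      have hx : PySem.Int.bxor ((n : Nat) : Int) (((n : Nat) : Int) + 1)
          = ((n ^^^ (n + 1) : Nat) : Int) := by
        have : ((n : Nat) : Int) + 1 = ((n + 1 : Nat) : Int) := by push_cast; ring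
        rw [this, PySem.Int.bxor_of_nonneg (by positivity) (by positivity)]
        simp
      rw [hx, pvXor_succ n k hkmin hkfalse,
        pvBitLength_two_pow_sub_one (k + 1) (by omega)]
      push_cast
      ring
    rw [hAk, hBk]
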